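-- pv_equiv track=rewrite | github.com/simeis-team/simeis | .forgejo/generate_swagger.py | get_comments_before
-- ===== SOURCE A (Python) =====
-- IGNORED_LINES = [
--     "TO" + "DO",
--     "FIXME",
-- ]
--
-- MDATA_KEYS = ["summary", "returns"]
--
-- def get_metadata(comments):
--     mdata = {}
--     doc = ""
--     for commentraw in comments:
--         comment = commentraw.removeprefix("//").strip()
--         ismdata = False
--         for key in MDATA_KEYS:
--             if "@" + key in comment:
--                 mdata[key] = comment.removeprefix("@" + key).strip()
--                 ismdata = True
--         if not ismdata:
--             doc += comment + "\n"
--     return (mdata, doc.strip())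
--
-- def get_comments_before(data, tag):
--     result = []
--     for (nline, line) in enumerate(data):
--         line = line.strip()
--         if tag in line:
--             if any(["@noswagger" in l for l in result]):
--                 result = []
--                 continue
--             mdata, doc = get_metadata(result)
--             return (nline, mdata, doc)
--         elif line.startswith("//") and all([s not in line for s in IGNORED_LINES]):
--             result.append(line)
--         else:
--             result = []
--     return None
-- ===== SOURCE B (Python) =====
-- IGNORED_LINES = [
--     "TO" + "DO",
--     "FIXME",
-- ]
--
-- MDATA_KEYS = ["summary", "returns"]
--
-- def get_metadata(comments):
--     mdata = {}
--     doc = ""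
--     for commentraw in comments:
--         comment = commentraw.removeprefix("//").strip()
--         ismdata = False
--         for key in MDATA_KEYS:
--             if "@" + key in comment:
--                 mdata[key] = comment.removeprefix("@" + key).strip()
--                 ismdata = True
--         if not ismdata:
--             doc += comment + "\n"
--     return (mdata, doc.strip())
--
-- def _is_comment(s, tag):
--     return tag not in s and s.startswith("//") and all(m not in s for m in IGNORED_LINES)
--
-- def get_comments_before(data, tag):
--     lines = [l.strip() for l in data]
--     for i, s in enumerate(lines):
--         if tag not in s:
--             continue
--         # walk backward over the preceding lines, collecting the comment block
--         block = []
--         j = i - 1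
--         while j >= 0 and _is_comment(lines[j], tag):
--             block.append(lines[j])
--             j -= 1
--         block.reverse()
--         if any("@noswagger" in l for l in block):
--             continue
--         mdata, doc = get_metadata(block)
--         return (i, mdata, doc)
--     return None
-- ===== Notes on version B (the rewrite author's own statement) =====
-- stated objective: alternative
-- what changed: Replaces A's forward scan that accumulates comment lines with resets by a scan for tag lines plus, at each tag line, a backward walk over the preceding stripped lines collecting the comment block (skipping to the next tag on @noswagger).
import Mathlib
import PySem

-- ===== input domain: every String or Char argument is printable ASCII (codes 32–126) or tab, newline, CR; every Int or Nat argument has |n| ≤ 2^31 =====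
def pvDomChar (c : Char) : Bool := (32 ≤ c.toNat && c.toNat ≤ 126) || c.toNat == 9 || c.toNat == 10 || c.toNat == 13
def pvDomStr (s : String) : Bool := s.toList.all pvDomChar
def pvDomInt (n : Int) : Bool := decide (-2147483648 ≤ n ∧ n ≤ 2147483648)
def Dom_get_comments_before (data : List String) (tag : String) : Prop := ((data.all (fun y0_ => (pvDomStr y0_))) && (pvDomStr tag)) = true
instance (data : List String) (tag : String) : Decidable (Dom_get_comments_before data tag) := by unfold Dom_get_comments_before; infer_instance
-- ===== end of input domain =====

-- B replaces A's forward accumulator-with-resets by a backward walk from each tag line (simpler decomposition; same cost).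

-- shared module context: IGNORED_LINES, MDATA_KEYS, get_metadata (used verbatim by both A and B)
def pvIgnoredLines : List (List Char) := [("TO" ++ "DO").toList, "FIXME".toList]

def pvMdataKeys : List (List Char) := ["summary".toList, "returns".toList]

-- str.removeprefix(p), exact
def pvRemoveprefix (s p : List Char) : List Char :=
  if PySem.Chars.startswith s p then s.drop p.length else s

def pvGetMetadata (comments : List (List Char)) : (List (String × String)) × String :=
  let r := comments.foldl
    (fun (acc : PySem.Dict String String × List Char) commentraw =>
      let comment := PySem.Chars.strip (pvRemoveprefix commentraw "//".toList)
      let step := pvMdataKeys.foldl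
        (fun (p : PySem.Dict String String × Bool) key =>
          if PySem.Chars.isIn ('@' :: key) comment then
            (p.1.insert (String.mk key) (String.mk (PySem.Chars.strip (pvRemoveprefix comment ('@' :: key)))), true)
          else p)
        (acc.1, false)
      if step.2 then (step.1, acc.2) else (step.1, acc.2 ++ comment ++ ['\n']))
    (PySem.Dict.empty, [])
  (r.1.items, String.mk (PySem.Chars.strip r.2))

-- ===== PORT A =====
-- A's loop: forward over enumerate(data), accumulating stripped // lines in `result`, resetting on non-comments
def pvGoA (tag : List Char) (nline : Int) (result : List (List Char)) :
    List (List Char) → Option (Int × (List (String × String)) × String)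
  | [] => none
  | l :: rest =>
    let line := PySem.Chars.strip l
    if PySem.Chars.isIn tag line then
      if result.any (fun r => PySem.Chars.isIn "@noswagger".toList r) then
        pvGoA tag (nline + 1) [] rest
      else
        let md := pvGetMetadata result
        some (nline, md.1, md.2)
    else if PySem.Chars.startswith line "//".toList
            && pvIgnoredLines.all (fun s => !PySem.Chars.isIn s line) then
      pvGoA tag (nline + 1) (result ++ [line]) rest
    else
      pvGoA tag (nline + 1) [] rest

def get_comments_before (data : List String) (tag : String) : Option (Int × (List (String × String)) × String) :=
  pvGoA tag.toList 0 [] (data.map (·.toList))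

-- ===== PORT B =====
-- B strips all lines up front, then for each tag line walks BACKWARD over the preceding
-- (already processed and reversed) lines collecting the comment block.
def pvIsComment (tag s : List Char) : Bool :=
  !PySem.Chars.isIn tag s && PySem.Chars.startswith s "//".toList
    && pvIgnoredLines.all (fun m => !PySem.Chars.isIn m s)

-- the backward while-loop: lines[i-1], lines[i-2], … is exactly the reversed prefix
def pvCollectBack (tag : List Char) : List (List Char) → List (List Char)
  | [] => []
  | l :: rest => if pvIsComment tag l then l :: pvCollectBack tag rest else []

def pvGoB (tag : List Char) (nline : Int) (revPrefix : List (List Char)) :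
    List (List Char) → Option (Int × (List (String × String)) × String)
  | [] => none
  | s :: rest =>
    if PySem.Chars.isIn tag s then
      let block := (pvCollectBack tag revPrefix).reverse
      if block.any (fun l => PySem.Chars.isIn "@noswagger".toList l) then
        pvGoB tag (nline + 1) (s :: revPrefix) rest
      else
        let md := pvGetMetadata block
        some (nline, md.1, md.2)
    else
      pvGoB tag (nline + 1) (s :: revPrefix) rest

def get_comments_before_alt (data : List String) (tag : String) : Option (Int × (List (String × String)) × String) :=
  pvGoB tag.toList 0 [] (data.map (fun l => PySem.Chars.strip l.toList))

-- ===== PRECONDITION & SPEC =====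
def Spec_get_comments_before (data : List String) (tag : String) (out : Option (Int × (List (String × String)) × String)) : Prop := out = get_comments_before_alt data tag
instance (data : List String) (tag : String) (out : Option (Int × (List (String × String)) × String)) : Decidable (Spec_get_comments_before data tag out) := by unfold Spec_get_comments_before; infer_instance

-- ===== CLAIM (what is proved, stated in full; the proofs are below) =====
def Claim_equal_get_comments_before : Prop := ∀ (data : List String) (tag : String), Dom_get_comments_before data tag → Spec_get_comments_before data tag (get_comments_before data tag)

-- ===== LEMMAS AND PROOFS =====

-- invariant: A's accumulator equals B's backward-collected block of the reversed prefix
theorem pvGoA_eq_pvGoB (tag : List Char) (rest : List (List Char)) :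
    ∀ (nline : Int) (revPrefix : List (List Char)),
      pvGoA tag nline ((pvCollectBack tag revPrefix).reverse) rest
        = pvGoB tag nline revPrefix (rest.map (fun l => PySem.Chars.strip l)) := by
  induction rest with
  | nil => intro n p; rfl
  | cons l rest ih =>
    intro n p
    simp only [List.map_cons, pvGoA, pvGoB]
    by_cases htag : PySem.Chars.isIn tag (PySem.Chars.strip l) = true
    · simp only [htag, if_true]
      by_cases hns : ((pvCollectBack tag p).reverse.any
          (fun r => PySem.Chars.isIn "@noswagger".toList r)) = true
      · simp only [hns, if_true]
        have hstop : (pvCollectBack tag (PySem.Chars.strip l :: p)).reverse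
            = ([] : List (List Char)) := by
          have : pvIsComment tag (PySem.Chars.strip l) = false := by
            simp [pvIsComment, htag]
          simp [pvCollectBack, this]
        rw [← hstop]
        exact ih (n + 1) (PySem.Chars.strip l :: p)
      · simp only [Bool.not_eq_true] at hns
        rw [List.any_reverse] at hns
        have hcond : ¬ ∃ x ∈ pvCollectBack tag p,
            PySem.Chars.isIn ['@', 'n', 'o', 's', 'w', 'a', 'g', 'g', 'e', 'r'] x = true := by
          simp only [List.any_eq_false] at hns
          push_neg
          intro x hx
          simpa using hns x hx
        simp [hcond]
    · simp only [htag, if_false, Bool.false_eq_true]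
      by_cases hc : (PySem.Chars.startswith (PySem.Chars.strip l) "//".toList
          && pvIgnoredLines.all (fun s => !PySem.Chars.isIn s (PySem.Chars.strip l))) = true
      · simp only [hc, if_true]
        rw [Bool.and_eq_true] at hc
        have hcomm : pvIsComment tag (PySem.Chars.strip l) = true := by
          have h1 : PySem.Chars.startswith (PySem.Chars.strip l) ['/', '/'] = true := by
            simpa using hc.1
          have h2 : (pvIgnoredLines.all (fun m => !PySem.Chars.isIn m (PySem.Chars.strip l))) = true := hc.2
          simp [pvIsComment, htag, h1, h2]
        have hgrow : pvCollectBack tag (PySem.Chars.strip l :: p)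
            = PySem.Chars.strip l :: pvCollectBack tag p := by
          simp [pvCollectBack, hcomm]
        have := ih (n + 1) (PySem.Chars.strip l :: p)
        rw [hgrow] at this
        simpa using this
      · simp only [hc, if_false, Bool.false_eq_true]
        have hstop : (pvCollectBack tag (PySem.Chars.strip l :: p)).reverse
            = ([] : List (List Char)) := by
          have hnc : pvIsComment tag (PySem.Chars.strip l) = false := by
            rw [Bool.not_eq_true] at hc
            rw [Bool.and_eq_false_iff] at hc
            rcases hc with h | h
            · have h' : PySem.Chars.startswith (PySem.Chars.strip l) ['/', '/'] = false := by
                simpa using h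
              simp [pvIsComment, h']
            · simp only [List.all_eq_false] at h
              simp [pvIsComment]
              intro _ _
              simpa using h
          simp [pvCollectBack, hnc]
        rw [← hstop]
        exact ih (n + 1) (PySem.Chars.strip l :: p)

-- ===== VERDICT (by name: the statement is the Claim_ definition above) =====
theorem get_comments_before_spec : Claim_equal_get_comments_before := by
  intro data tag _
  unfold Spec_get_comments_before get_comments_before get_comments_before_alt
  have h := pvGoA_eq_pvGoB tag.toList (data.map (·.toList)) 0 []
  simpa [pvCollectBack, List.map_map, Function.comp] using h
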